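-- pv_equiv track=rewrite | github.com/Ishani018/test | app.py | uniform_process_poem
-- ===== SOURCE A (Python) =====
-- def uniform_process_poem(content, length):
--     lines = content.splitlines()
--     first_line = lines[0].strip()
--     content_lines = [line.strip() for line in lines[1:] if line.strip()]
--
--     formatted_content = [first_line + "\n"]
--
--     index = 0
--     for line in content_lines:
--         formatted_content.append(line)
--         index += 1
--         if index == length:
--             formatted_content.append("")
--             index = 0
--
--     return "\n".join(formatted_content)
-- ===== SOURCE B (Python) =====
-- def uniform_process_poem(content, length):
--     lines = content.splitlines()
--     first_line = lines[0].strip()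
--     content_lines = [line.strip() for line in lines[1:] if line.strip()]
--     result = [first_line + "\n"]
--     if length > 0:
--         rest = content_lines
--         while rest:
--             chunk, rest = rest[:length], rest[length:]
--             result.extend(chunk)
--             if len(chunk) == length:
--                 result.append("")
--     else:
--         result.extend(content_lines)
--     return "\n".join(result)
-- ===== Notes on version B (the rewrite author's own statement) =====
-- stated objective: alternative
-- what changed: Replaced the running index counter (increment, compare to length, reset) by a chunking pass: slice content_lines into blocks of `length` and append a blank line after exactly the full blocks; the length<=0 case becomes a plain extend with no counter at all.
import Mathlib
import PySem

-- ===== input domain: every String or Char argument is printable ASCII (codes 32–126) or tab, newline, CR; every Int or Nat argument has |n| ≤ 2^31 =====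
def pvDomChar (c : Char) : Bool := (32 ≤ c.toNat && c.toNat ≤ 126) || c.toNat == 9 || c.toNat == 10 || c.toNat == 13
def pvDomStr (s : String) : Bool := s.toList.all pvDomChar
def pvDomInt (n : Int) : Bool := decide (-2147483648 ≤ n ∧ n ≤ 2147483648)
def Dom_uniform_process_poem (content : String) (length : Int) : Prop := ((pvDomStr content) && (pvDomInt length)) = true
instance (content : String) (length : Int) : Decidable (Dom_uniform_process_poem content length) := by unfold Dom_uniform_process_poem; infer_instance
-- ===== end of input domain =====

-- B replaces A's running index counter by slicing the body lines into chunks of `length`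
-- (blank line appended after exactly the full chunks) — an alternative decomposition, same cost.
-- Pre_ excludes only content = "", on which A raises IndexError (lines[0] of []); B raises there too.


-- ===== PORT A =====
-- one loop step of A's `for line in content_lines` with state (formatted_content, index)
def pvStepA (length : Int) (st : List String × Int) (line : String) : List String × Int :=
  let fc := st.1 ++ [line]
  let idx := st.2 + 1
  if idx = length then (fc ++ [""], 0) else (fc, idx)

def uniform_process_poem (content : String) (length : Int) : String :=
  let lines := PySem.Str.splitlines content
  let first_line := PySem.Str.strip ((PySem.List.pyGet? lines 0).getD "")   -- Pre_ excludes lines = []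
  let content_lines := ((PySem.List.slice lines (some 1) none).map PySem.Str.strip).filter (fun l => l != "")
  let st := List.foldl (pvStepA length) ([first_line ++ "\n"], 0) content_lines
  PySem.Str.join "\n" st.1

-- ===== PORT B =====
-- B's `while rest:` chunking loop; chunk size is m+1 (= length, positive by the guard at the
-- call site; the +1 encoding makes the recursion on `drop` terminate)
def pvChunksB (m : Nat) : List String → List String
  | [] => []
  | l :: ls =>
    let chunk := List.take (m+1) (l :: ls)
    chunk ++ (if chunk.length = m+1 then [""] else []) ++ pvChunksB m (List.drop (m+1) (l :: ls))
termination_by rest => rest.length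
decreasing_by simp

def uniform_process_poem_alt (content : String) (length : Int) : String :=
  let lines := PySem.Str.splitlines content
  let first_line := PySem.Str.strip ((PySem.List.pyGet? lines 0).getD "")   -- Pre_ excludes lines = []
  let content_lines := ((PySem.List.slice lines (some 1) none).map PySem.Str.strip).filter (fun l => l != "")
  let body := if 0 < length then pvChunksB (length.toNat - 1) content_lines else content_lines
  PySem.Str.join "\n" ([first_line ++ "\n"] ++ body)

-- ===== PRECONDITION & SPEC =====
-- Pre_ excludes only content = "": there splitlines is [] and A's lines[0] raises IndexError.
def Pre_uniform_process_poem (content : String) (length : Int) : Prop := content ≠ ""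
instance (content : String) (length : Int) : Decidable (Pre_uniform_process_poem content length) := by unfold Pre_uniform_process_poem; infer_instance
def pvWitness_uniform_process_poem : String × Int := ("Title\nline a\nline b\nline c", 2)

def Spec_uniform_process_poem (content : String) (length : Int) (out : String) : Prop := out = uniform_process_poem_alt content length
instance (content : String) (length : Int) (out : String) : Decidable (Spec_uniform_process_poem content length out) := by unfold Spec_uniform_process_poem; infer_instance

-- ===== CLAIM (what is proved, stated in full; the proofs are below) =====
def Claim_equal_uniform_process_poem : Prop := ∀ (content : String) (length : Int), Dom_uniform_process_poem content length → Pre_uniform_process_poem content length → Spec_uniform_process_poem content length (uniform_process_poem content length)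

-- ===== LEMMAS AND PROOFS =====

-- length ≤ 0: A's counter (always ≥ 1 after the increment) never equals length, so no blanks.
theorem pvFoldA_nonpos (length : Int) (hL : length ≤ 0) :
    ∀ (ls acc : List String) (j : Nat),
      List.foldl (pvStepA length) (acc, (j : Int)) ls = (acc ++ ls, ((j + ls.length : Nat) : Int)) := by
  intro ls
  induction ls with
  | nil => intro acc j; simp
  | cons l ls ih =>
    intro acc j
    have hne : ((j : Int) + 1) ≠ length := by push_cast; omega
    simp only [List.foldl_cons, pvStepA, if_neg hne]
    rw [show ((j : Int) + 1) = (((j + 1 : Nat) : Int)) by push_cast; ring]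
    rw [ih (acc ++ [l]) (j + 1)]
    simp only [Prod.mk.injEq, List.append_assoc, List.singleton_append, List.length_cons]
    exact ⟨trivial, by push_cast; ring⟩

-- counter j, fewer than (m+1)-j lines left: the loop just appends them all.
theorem pvFoldA_small (m : Nat) (ls acc : List String) (j : Nat)
    (h : j + ls.length < m + 1) :
    List.foldl (pvStepA ((m : Int) + 1)) (acc, (j : Int)) ls = (acc ++ ls, ((j + ls.length : Nat) : Int)) := by
  induction ls generalizing acc j with
  | nil => simp
  | cons l ls ih =>
    have h' : j + ls.length + 1 < m + 1 := by simpa [Nat.add_assoc] using h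
    have hne : ((j : Int) + 1) ≠ ((m : Int) + 1) := by push_cast; omega
    simp only [List.foldl_cons, pvStepA, if_neg hne]
    rw [show ((j : Int) + 1) = (((j + 1 : Nat) : Int)) by push_cast; ring]
    rw [ih (acc ++ [l]) (j + 1) (by omega)]
    simp only [Prod.mk.injEq, List.append_assoc, List.singleton_append, List.length_cons]
    exact ⟨trivial, by push_cast; ring⟩

-- counter j, at least (m+1)-j lines left: the loop completes the block, emits "", resets to 0.
theorem pvFoldA_block (m : Nat) (ls acc : List String) (j : Nat)
    (hj : j < m + 1) (h : m + 1 ≤ j + ls.length) :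
    List.foldl (pvStepA ((m : Int) + 1)) (acc, (j : Int)) ls
      = List.foldl (pvStepA ((m : Int) + 1)) (acc ++ List.take (m + 1 - j) ls ++ [""], 0) (List.drop (m + 1 - j) ls) := by
  induction ls generalizing acc j with
  | nil => simp at h; exact absurd hj (by omega)
  | cons l ls ih =>
    by_cases hb : j + 1 = m + 1
    · have heq : ((j : Int) + 1) = ((m : Int) + 1) := by push_cast; omega
      have h1 : m + 1 - j = 1 := by omega
      simp only [List.foldl_cons, pvStepA, if_pos heq, h1, List.take_succ_cons, List.take_zero,
        List.drop_succ_cons, List.drop_zero]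
    · have hne : ((j : Int) + 1) ≠ ((m : Int) + 1) := by push_cast; omega
      have h' : m + 1 ≤ (j + 1) + ls.length := by simp at h; omega
      simp only [List.foldl_cons, pvStepA, if_neg hne]
      rw [show ((j : Int) + 1) = (((j + 1 : Nat) : Int)) by push_cast; ring]
      rw [ih (acc ++ [l]) (j + 1) (by omega) h']
      have h2 : m + 1 - j = (m + 1 - (j + 1)) + 1 := by omega
      rw [h2]
      simp only [List.take_succ_cons, List.drop_succ_cons]
      simp

-- A's whole loop from a reset counter equals B's chunking.
theorem pvFoldA_eq_chunks (m : Nat) (ls acc : List String) :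
    (List.foldl (pvStepA ((m : Int) + 1)) (acc, 0) ls).1 = acc ++ pvChunksB m ls := by
  cases ls with
  | nil => rw [pvChunksB]; simp
  | cons l ls' =>
    by_cases hsmall : (l :: ls').length < m + 1
    · rw [show (0 : Int) = ((0 : Nat) : Int) from rfl,
        pvFoldA_small m (l :: ls') acc 0 (by omega)]
      rw [pvChunksB]
      have ht : List.take (m + 1) (l :: ls') = l :: ls' := List.take_of_length_le (by omega)
      have hd : List.drop (m + 1) (l :: ls') = [] := List.drop_of_length_le (by omega)
      rw [ht, hd, pvChunksB]
      rw [if_neg (by omega : ¬ (l :: ls').length = m + 1)]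
      simp
    · rw [show (0 : Int) = ((0 : Nat) : Int) from rfl,
        pvFoldA_block m (l :: ls') acc 0 (by omega) (by omega)]
      simp only [Nat.sub_zero]
      rw [pvFoldA_eq_chunks m (List.drop (m + 1) (l :: ls')) (acc ++ List.take (m + 1) (l :: ls') ++ [""])]
      rw [pvChunksB]
      rw [if_pos (by rw [List.length_take]; omega : (List.take (m + 1) (l :: ls')).length = m + 1)]
      simp
  termination_by ls.length
  decreasing_by simp

-- ===== VERDICT (by name: the statement is the Claim_ definition above) =====
theorem uniform_process_poem_spec : Claim_equal_uniform_process_poem := by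
  intro content length _ _
  unfold Spec_uniform_process_poem uniform_process_poem uniform_process_poem_alt
  dsimp only
  by_cases hpos : 0 < length
  · obtain ⟨m, hm⟩ : ∃ m : Nat, length = (m : Int) + 1 := ⟨(length - 1).toNat, by omega⟩
    subst hm
    rw [if_pos hpos]
    rw [show ((m : Int) + 1).toNat - 1 = m by omega]
    rw [pvFoldA_eq_chunks]
  · rw [if_neg hpos]
    have h := pvFoldA_nonpos length (by omega)
      (((PySem.List.slice (PySem.Str.splitlines content) (some 1) none).map PySem.Str.strip).filter (fun l => l != ""))
      [PySem.Str.strip ((PySem.List.pyGet? (PySem.Str.splitlines content) 0).getD "") ++ "\n"] 0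
    simp only [Nat.cast_zero] at h
    rw [h]
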